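-- pv_equiv track=rewrite | github.com/Hoony0321/Algorithm | 2023_04/15/programmers_135808.py | solution
-- ===== SOURCE A (Python) =====
-- from collections import deque
--
-- def solution(k, m, score):
--     answer = 0
--     score.sort(reverse=True)
--     score = deque(score)
--     boxList = []
--
--     while(len(score) >= m):
--         box = []
--         for _ in range(m):
--             box.append(score.popleft())
--
--         boxList.append(box)
--
--     for box in boxList:
--         answer += min(box) * len(box)
--
--
--
--     return answer
-- ===== SOURCE B (Python) =====
-- def solution(k, m, score):
--     # Sort descending in place (same observable mutation as A); each full box of m
--     # consecutive scores has its minimum at sorted index i*m + (m-1), so sum those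
--     # strided minima directly -- no deque, no boxes.
--     score.sort(reverse=True)
--     total = 0
--     for i in range(m - 1, len(score), m):
--         total += score[i]
--     return m * total
-- ===== Notes on version B (the rewrite author's own statement) =====
-- stated objective: simpler
-- what changed: Replaces the deque-popping box construction plus a second pass over the list of boxes by a single strided-index pass over the descending-sorted list (each full box's minimum sits at index i*m+m-1), returning m times that sum.
import Mathlib
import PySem

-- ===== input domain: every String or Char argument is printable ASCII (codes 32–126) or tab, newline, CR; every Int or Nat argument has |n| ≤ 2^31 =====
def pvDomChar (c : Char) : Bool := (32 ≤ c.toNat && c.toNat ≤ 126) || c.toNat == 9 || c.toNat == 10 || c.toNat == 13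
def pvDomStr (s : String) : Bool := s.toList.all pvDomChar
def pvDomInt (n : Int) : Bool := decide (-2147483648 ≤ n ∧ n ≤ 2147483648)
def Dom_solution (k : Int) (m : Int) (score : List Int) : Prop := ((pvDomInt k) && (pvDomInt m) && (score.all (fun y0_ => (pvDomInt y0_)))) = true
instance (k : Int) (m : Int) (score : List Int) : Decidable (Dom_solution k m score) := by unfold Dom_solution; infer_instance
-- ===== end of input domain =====

-- B replaces A's deque-popping box construction and second pass over the boxes by one
-- strided-index pass over the descending-sorted list (objective: simpler).  Both A and B
-- sort the caller's list in place; the theorems below are about the return value.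

-- ===== PORT A =====
-- the while loop: pop m elements from the front into a box while len(score) >= m.
-- The '1 ≤ m' conjunct only makes the recursion total: Python A never returns for m ≤ 0
-- (infinite loop), and Pre_solution excludes those inputs.
def boxesA (m : Int) (score : List Int) : List (List Int) :=
  if h : 1 ≤ m ∧ m.toNat ≤ score.length then
    score.take m.toNat :: boxesA m (score.drop m.toNat)
  else []
termination_by score.length
decreasing_by simp [List.length_drop]; omega

def solution (k : Int) (m : Int) (score : List Int) : Int :=
  let sortedScore := PySem.List.sorted score (fun x => x) true
  (boxesA m sortedScore).foldl
    (fun answer box =>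
      answer + (PySem.List.min? box (fun x => x)).getD 0 * (box.length : Int)) 0

-- ===== PORT B =====
def solution_alt (k : Int) (m : Int) (score : List Int) : Int :=
  let s := PySem.List.sorted score (fun x => x) true
  m * (PySem.List.pyRange (m - 1) (PySem.List.len s) m).foldl
        (fun total i => total + PySem.List.pyGetD s i 0) 0

-- ===== PRECONDITION & SPEC =====
-- Pre_ excludes m ≤ 0, on which Python A never returns (its while loop runs forever).
def Pre_solution (k : Int) (m : Int) (score : List Int) : Prop := 1 ≤ m
instance (k : Int) (m : Int) (score : List Int) : Decidable (Pre_solution k m score) := by unfold Pre_solution; infer_instance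
def pvWitness_solution : Int × Int × List Int := (4, 2, [3, 1, 2])

def Spec_solution (k : Int) (m : Int) (score : List Int) (out : Int) : Prop := out = solution_alt k m score
instance (k : Int) (m : Int) (score : List Int) (out : Int) : Decidable (Spec_solution k m score out) := by unfold Spec_solution; infer_instance

-- ===== CLAIM (what is proved, stated in full; the proofs are below) =====
def Claim_equal_solution : Prop := ∀ (k : Int) (m : Int) (score : List Int), Dom_solution k m score → Pre_solution k m score → Spec_solution k m score (solution k m score)

-- ===== LEMMAS AND PROOFS =====

-- sum of every m-th element (the per-box minima), as a recursion shared by both proofs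
def strideSum (t : Nat) (l : List Int) : Int :=
  if h : 0 < t ∧ t ≤ l.length then l.getD (t - 1) 0 + strideSum t (l.drop t) else 0
termination_by l.length
decreasing_by simp [List.length_drop]; omega

-- Python min over a descending-sorted nonempty list is its last element
theorem min?_desc_cons : ∀ (rest : List Int) (a : Int),
    (a :: rest).Pairwise (fun x y => y ≤ x) →
    PySem.List.min? (a :: rest) (fun x => x) = (a :: rest).getLast? := by
  intro rest
  induction rest with
  | nil => intro a _; simp [PySem.List.min?]
  | cons y r ih =>
    intro a h
    have hya : y ≤ a := (List.pairwise_cons.1 h).1 y (by simp)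
    have hr : (y :: r).Pairwise (fun x y => y ≤ x) := (List.pairwise_cons.1 h).2
    have hstep : (if y < a then some y else some a) = some y := by
      split_ifs with hlt
      · rfl
      · exact congrArg some (le_antisymm (not_lt.1 hlt) hya)
    have hprev := ih y hr
    simp only [PySem.List.min?, List.foldl_cons] at hprev ⊢
    rw [List.getLast?_cons_cons]
    simpa [hstep] using hprev

theorem min?_desc (l : List Int) (hne : l ≠ [])
    (hp : l.Pairwise (fun x y => y ≤ x)) :
    PySem.List.min? l (fun x => x) = l.getLast? := by
  cases l with
  | nil => exact absurd rfl hne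
  | cons a rest => exact min?_desc_cons rest a hp

-- A's loop over the boxes equals m * strideSum, on a descending-sorted list
theorem boxesA_sum (m : Int) (hm : 1 ≤ m) :
    ∀ (n : Nat) (l : List Int), l.length ≤ n → l.Pairwise (fun x y => y ≤ x) →
      (boxesA m l).foldl
        (fun answer box =>
          answer + (PySem.List.min? box (fun x => x)).getD 0 * (box.length : Int)) 0
        = m * strideSum m.toNat l := by
  intro n
  induction n with
  | zero =>
    intro l hl _
    have : l = [] := List.eq_nil_of_length_eq_zero (Nat.le_zero.1 hl)
    subst this
    rw [boxesA, strideSum, dif_neg (by simp only [List.length_nil]; omega),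
        dif_neg (by simp only [List.length_nil]; omega)]
    simp
  | succ n ih =>
    intro l hl hp
    by_cases hlen : m.toNat ≤ l.length
    · have ht : 1 ≤ m.toNat := by omega
      rw [boxesA, strideSum]
      rw [dif_pos ⟨hm, hlen⟩, dif_pos ⟨ht, hlen⟩]
      have hne : l.take m.toNat ≠ [] :=
        List.ne_nil_of_length_pos (by rw [List.length_take]; omega)
      have htake : (l.take m.toNat).Pairwise (fun x y => y ≤ x) :=
        hp.sublist (List.take_sublist _ _)
      have hdrop : (l.drop m.toNat).Pairwise (fun x y => y ≤ x) :=
        hp.sublist (List.drop_sublist _ _)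
      have h3 : m.toNat - 1 < l.length := by omega
      have hlast : (l.take m.toNat).getLast? = some (l.getD (m.toNat - 1) 0) := by
        rw [List.getLast?_eq_getElem?]
        have h2 : (l.take m.toNat).length = m.toNat := by simp; omega
        rw [h2, List.getElem?_take_of_lt (by omega), List.getElem?_eq_getElem h3,
            List.getD_eq_getElem l 0 h3]
      rw [List.foldl_cons, PySem.List.foldl_add]
      have hrec := ih (l.drop m.toNat) (by rw [List.length_drop]; omega) hdrop
      rw [PySem.List.foldl_add] at hrec
      simp only [zero_add] at hrec ⊢
      rw [min?_desc _ hne htake, hlast, hrec]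
      simp only [Option.getD_some]
      have hlentake : (((l.take m.toNat).length : Nat) : Int) = m := by
        simp only [List.length_take]
        omega
      rw [hlentake]; ring
    · rw [boxesA, strideSum]
      rw [dif_neg (by omega), dif_neg (by omega)]
      simp

-- B's strided range, rewritten as List.range over the number of full boxes
theorem pyRange_map (t : Nat) (ht : 0 < t) (l : List Int) :
    (PySem.List.pyRange ((t : Int) - 1) (PySem.List.len l) t).map (fun i => PySem.List.pyGetD l i 0)
      = (List.range (l.length / t)).map
          (fun j : Nat => PySem.List.pyGetD l ((t : Int) - 1 + t * (j : Int)) 0) := by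
  rw [PySem.List.pyRange_of_pos _ _ (by exact_mod_cast ht)]
  rw [List.map_map]
  have hcount : (if (t : Int) - 1 < PySem.List.len l then (((PySem.List.len l) - ((t : Int) - 1) + t - 1) / t).toNat else 0)
      = l.length / t := by
    simp only [PySem.List.len]
    split_ifs with hlt
    · have hnum : ((l.length : Int)) - ((t : Int) - 1) + t - 1 = (l.length : Int) := by ring
      rw [hnum, ← Int.natCast_ediv, Int.toNat_natCast]
    · have : l.length < t := by omega
      rw [Nat.div_eq_of_lt this]
  rw [hcount]
  rfl

-- the range-indexed sum of strided elements equals strideSum (getD form, t = s+1)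
theorem stride_getD (s : Nat) :
    ∀ (n : Nat) (l : List Int), l.length ≤ n →
      ((List.range (l.length / (s + 1))).map (fun j : Nat => l.getD (s + (s + 1) * j) 0)).sum
        = strideSum (s + 1) l := by
  intro n
  induction n with
  | zero =>
    intro l hl
    have : l = [] := List.eq_nil_of_length_eq_zero (Nat.le_zero.1 hl)
    subst this
    rw [strideSum, dif_neg (by simp only [List.length_nil]; omega)]
    simp
  | succ n ih =>
    intro l hl
    by_cases hlen : s + 1 ≤ l.length
    · rw [strideSum, dif_pos ⟨Nat.succ_pos s, hlen⟩]
      have hdivs : l.length / (s + 1) = (l.length - (s + 1)) / (s + 1) + 1 :=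
        Nat.div_eq_sub_div (Nat.succ_pos s) hlen
      rw [hdivs, List.range_succ_eq_map, List.map_cons, List.map_map, List.sum_cons]
      have hrec := ih (l.drop (s + 1)) (by rw [List.length_drop]; omega)
      rw [List.length_drop] at hrec
      have hshift : ∀ j : Nat,
          l.getD (s + (s + 1) * Nat.succ j) 0 = (l.drop (s + 1)).getD (s + (s + 1) * j) 0 := by
        intro j
        rw [show s + (s + 1) * Nat.succ j = s + 1 + (s + (s + 1) * j) from by
          simp only [Nat.succ_eq_add_one]; ring]
        simp only [List.getD_eq_getElem?_getD, List.getElem?_drop]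
      have htail :
          (List.map ((fun j : Nat => l.getD (s + (s + 1) * j) 0) ∘ Nat.succ)
            (List.range ((l.length - (s + 1)) / (s + 1)))).sum
          = strideSum (s + 1) (l.drop (s + 1)) := by
        rw [← hrec]
        apply congrArg
        apply List.map_congr_left
        intro j _
        exact hshift j
      rw [htail]
      simp
    · rw [strideSum, dif_neg (by omega)]
      rw [Nat.div_eq_of_lt (by omega)]
      simp

-- bridge: the pyGetD-at-Int-index form equals the getD-at-Nat-index form
theorem stride_sum_eq (t : Nat) (ht : 0 < t) (l : List Int) :
    ((List.range (l.length / t)).map (fun j : Nat => PySem.List.pyGetD l ((t : Int) - 1 + t * (j : Int)) 0)).sum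
      = strideSum t l := by
  obtain ⟨s, rfl⟩ : ∃ s, t = s + 1 := ⟨t - 1, by omega⟩
  have hidx : ∀ j : Nat,
      PySem.List.pyGetD l (((s + 1 : Nat) : Int) - 1 + ((s + 1 : Nat) : Int) * (j : Int)) 0
        = l.getD (s + (s + 1) * j) 0 := by
    intro j
    rw [show (((s + 1 : Nat) : Int) - 1 + ((s + 1 : Nat) : Int) * (j : Int))
          = ((s + (s + 1) * j : Nat) : Int) by push_cast; ring]
    rw [PySem.List.pyGetD_of_nonneg _ _ (by positivity), Int.toNat_natCast]
  rw [List.map_congr_left (fun j _ => hidx j)]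
  exact stride_getD s l.length l le_rfl

-- ===== VERDICT (by name: the statement is the Claim_ definition above) =====
theorem solution_spec : Claim_equal_solution := by
  intro k m score _ hpre
  have hm : 1 ≤ m := hpre
  obtain ⟨t, rfl⟩ : ∃ t : Nat, m = (t : Int) := ⟨m.toNat, by omega⟩
  have ht : 0 < t := by exact_mod_cast hm
  unfold Spec_solution solution solution_alt
  simp only []
  set s := PySem.List.sorted score (fun x => x) true with hs
  have hp : s.Pairwise (fun x y => y ≤ x) := by
    rw [hs]; exact PySem.List.sorted_pairwise_rev score (fun x => x)
  rw [boxesA_sum (t : Int) hm s.length s le_rfl hp]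
  rw [PySem.List.foldl_add, zero_add, pyRange_map t ht s, stride_sum_eq t ht s]
  simp
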